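-- pv_equiv track=rewrite | github.com/PedroGeometrias/chessAI | AI/intermediateTranslation.py | process_fen
-- ===== SOURCE A (Python) =====
-- def process_fen(fen):
--     """Standardize the FEN string for processing."""
--     fen_parts = fen.split(' ')
--     rows = fen_parts[0].split('/')
--     processed_rows = []
--
--     for row in rows:
--         processed_row = ""
--         empty_count = 0
--
--         for char in row:
--             if char == '.':
--                 empty_count += 1
--             elif char.isdigit():
--                 empty_count += int(char)
--             else:
--                 if empty_count > 0:
--                     processed_row += str(empty_count)
--                     empty_count = 0
--                 processed_row += char
--
--         if empty_count > 0:
--             processed_row += str(empty_count)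
--
--         processed_rows.append(processed_row)
--
--     fen_parts[0] = "/".join(processed_rows)
--     return " ".join(fen_parts)
-- ===== SOURCE B (Python) =====
-- def process_fen(fen):
--     """Standardize the FEN string for processing (run-partition rewrite)."""
--     parts = fen.split(' ')
--     new_rows = []
--     for row in parts[0].split('/'):
--         pieces = []
--         i, n = 0, len(row)
--         while i < n:
--             c = row[i]
--             if c == '.' or c.isdigit():
--                 total = 0
--                 while i < n and (row[i] == '.' or row[i].isdigit()):
--                     total += 1 if row[i] == '.' else int(row[i])
--                     i += 1
--                 if total > 0:
--                     pieces.append(str(total))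
--             else:
--                 j = i
--                 while j < n and not (row[j] == '.' or row[j].isdigit()):
--                     j += 1
--                 pieces.append(row[i:j])
--                 i = j
--         new_rows.append(''.join(pieces))
--     return ' '.join(['/'.join(new_rows)] + parts[1:])
-- ===== Notes on version B (the rewrite author's own statement) =====
-- stated objective: alternative
-- what changed: Each row is processed by peeling maximal runs (an empty-square run is summed and emitted as one count, a piece run is copied verbatim) instead of A's per-character state machine carrying a pending empty_count that is flushed before each piece and at the row's end.
import Mathlib
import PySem

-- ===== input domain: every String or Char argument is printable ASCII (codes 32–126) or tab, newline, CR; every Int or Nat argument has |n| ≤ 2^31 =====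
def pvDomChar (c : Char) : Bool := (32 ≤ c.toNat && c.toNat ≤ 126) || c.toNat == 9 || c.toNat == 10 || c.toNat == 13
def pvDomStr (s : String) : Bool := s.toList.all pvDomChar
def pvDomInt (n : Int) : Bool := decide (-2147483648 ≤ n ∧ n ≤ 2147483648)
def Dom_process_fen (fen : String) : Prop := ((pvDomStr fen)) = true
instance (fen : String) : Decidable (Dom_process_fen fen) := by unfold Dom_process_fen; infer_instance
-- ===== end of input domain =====

-- B re-decomposes each row into maximal runs (empty-square run → its summed count, piece run → verbatim)
-- instead of A's char-by-char counter state machine; objective: alternative decomposition, same cost.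

-- int(char): exact for the one-digit strings this code feeds it ('0'..'9'); the
-- .getD 0 default is unreachable because both programs only call it on isdigit chars.
def pvChNum (c : Char) : Int := (PySem.Int.ofChars? [c]).getD 0

-- ===== PORT A =====
-- the body of A's inner `for char in row` loop, state = (processed_row, empty_count)
def pvStepA (st : List Char × Int) (c : Char) : List Char × Int :=
  if c == '.' then (st.1, st.2 + 1)
  else if PySem.Chars.isdigit c then (st.1, st.2 + pvChNum c)
  else ((if st.2 > 0 then st.1 ++ PySem.Int.toChars st.2 else st.1) ++ [c], 0)

def pvRowA (row : List Char) : List Char :=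
  let st := row.foldl pvStepA ([], 0)
  if st.2 > 0 then st.1 ++ PySem.Int.toChars st.2 else st.1

def process_fen (fen : String) : String :=
  let fenParts := PySem.Chars.splitOn fen.toList [' ']
  -- fen_parts[0]: split(' ') always yields a non-empty list, so headD never takes the default
  let rows := PySem.Chars.splitOn (fenParts.headD []) ['/']
  let processedRows := rows.map pvRowA
  String.ofList (PySem.Chars.join [' '] (PySem.Chars.join ['/'] processedRows :: fenParts.tail))

-- ===== PORT B =====
-- B's run predicate: char is an empty-square marker
def pvEmptyCh (c : Char) : Bool := c == '.' || PySem.Chars.isdigit c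

-- B's row loop: peel one maximal run per step
def pvRowB (row : List Char) : List Char :=
  match row with
  | [] => []
  | c :: rest =>
    if pvEmptyCh c then
      let t := (c :: rest.takeWhile pvEmptyCh).foldl
        (fun s d => s + (if d == '.' then (1 : Int) else pvChNum d)) 0
      (if t > 0 then PySem.Int.toChars t else []) ++ pvRowB (rest.dropWhile pvEmptyCh)
    else
      (c :: rest.takeWhile (fun d => !pvEmptyCh d)) ++
        pvRowB (rest.dropWhile (fun d => !pvEmptyCh d))
termination_by row.length
decreasing_by
  · exact Nat.lt_succ_of_le (List.length_dropWhile_le _ _)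
  · exact Nat.lt_succ_of_le (List.length_dropWhile_le _ _)

def process_fen_alt (fen : String) : String :=
  let parts := PySem.Chars.splitOn fen.toList [' ']
  let rows := PySem.Chars.splitOn (parts.headD []) ['/']
  let newRows := rows.map pvRowB
  String.ofList (PySem.Chars.join [' '] (PySem.Chars.join ['/'] newRows :: parts.tail))

-- ===== PRECONDITION & SPEC =====
def Spec_process_fen (fen : String) (out : String) : Prop := out = process_fen_alt fen
instance (fen : String) (out : String) : Decidable (Spec_process_fen fen out) := by unfold Spec_process_fen; infer_instance

-- ===== CLAIM (what is proved, stated in full; the proofs are below) =====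
def Claim_equal_process_fen : Prop := ∀ (fen : String), Dom_process_fen fen → Spec_process_fen fen (process_fen fen)

-- ===== LEMMAS AND PROOFS =====

-- the flushed count A appends ('' when the count is not positive)
def pvEmit (t : Int) : List Char := if t > 0 then PySem.Int.toChars t else []

-- per-char contribution to an empty-run count
def pvVal (c : Char) : Int := if c == '.' then 1 else pvChNum c

-- specification of A's inner loop as structural recursion with a pending count
def pvProcP (cnt : Int) : List Char → List Char
  | [] => pvEmit cnt
  | c :: cs =>
    if c == '.' then pvProcP (cnt + 1) cs
    else if PySem.Chars.isdigit c then pvProcP (cnt + pvChNum c) cs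
    else pvEmit cnt ++ c :: pvProcP 0 cs

lemma pvFoldA (cs : List Char) : ∀ (acc : List Char) (cnt : Int),
    (cs.foldl pvStepA (acc, cnt)).1 ++ pvEmit (cs.foldl pvStepA (acc, cnt)).2
      = acc ++ pvProcP cnt cs := by
  induction cs with
  | nil => intro acc cnt; simp [pvProcP]
  | cons c cs ih =>
    intro acc cnt
    by_cases h1 : c = '.'
    · simp [pvStepA, pvProcP, h1, ih]
    · by_cases h2 : PySem.Chars.isdigit c
      · simp [pvStepA, pvProcP, h1, h2, ih]
      · simp [pvStepA, pvProcP, h1, h2, ih]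
        unfold pvEmit
        split_ifs <;> simp [List.append_assoc]

lemma pvRowA_eq_procP (cs : List Char) : pvRowA cs = pvProcP 0 cs := by
  have h := pvFoldA cs [] 0
  simp only [List.nil_append] at h
  rw [pvRowA, ← h]
  unfold pvEmit
  split_ifs <;> simp

lemma pvProcP_run (g : List Char) (h : ∀ d ∈ g, pvEmptyCh d = true) :
    ∀ (cnt : Int) (cs : List Char),
      pvProcP cnt (g ++ cs) = pvProcP (cnt + (g.map pvVal).sum) cs := by
  induction g with
  | nil => intro cnt cs; simp
  | cons d g ih =>
    intro cnt cs
    have hd : pvEmptyCh d = true := h d (by simp)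
    have hg : ∀ e ∈ g, pvEmptyCh e = true := fun e he => h e (by simp [he])
    by_cases h1 : d = '.'
    · simp [pvProcP, h1, ih hg, pvVal, add_assoc]
    · have h2 : PySem.Chars.isdigit d = true := by
        simpa [pvEmptyCh, h1] using hd
      simp [pvProcP, h1, h2, ih hg, pvVal, add_assoc]

lemma pvProcP_lit (g : List Char) (h : ∀ d ∈ g, pvEmptyCh d = false) :
    ∀ cs : List Char, pvProcP 0 (g ++ cs) = g ++ pvProcP 0 cs := by
  induction g with
  | nil => intro cs; simp
  | cons d g ih =>
    intro cs
    have hd : pvEmptyCh d = false := h d (by simp)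
    have h1 : ¬ d = '.' := by
      intro he; simp [pvEmptyCh, he] at hd
    have h2 : PySem.Chars.isdigit d = false := by
      simpa [pvEmptyCh, h1] using hd
    have hg : ∀ e ∈ g, pvEmptyCh e = false := fun e he => h e (by simp [he])
    simp [pvProcP, h1, h2, ih hg, pvEmit]

lemma pvProcP_flush (t : Int) (r : List Char)
    (h : r = [] ∨ ∃ d r', r = d :: r' ∧ pvEmptyCh d = false) :
    pvProcP t r = pvEmit t ++ pvProcP 0 r := by
  rcases h with h | ⟨d, r', rfl, hd⟩
  · subst h; simp [pvProcP, pvEmit]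
  · have h1 : ¬ d = '.' := by
      intro he; simp [pvEmptyCh, he] at hd
    have h2 : PySem.Chars.isdigit d = false := by
      simpa [pvEmptyCh, h1] using hd
    simp [pvProcP, h1, h2, pvEmit]

lemma pvDrop_shape (p : Char → Bool) (rest : List Char) :
    rest.dropWhile p = [] ∨
      ∃ d r', rest.dropWhile p = d :: r' ∧ p d = false := by
  cases hr : rest.dropWhile p with
  | nil => exact Or.inl rfl
  | cons d r' =>
    refine Or.inr ⟨d, r', rfl, ?_⟩
    have := List.head_dropWhile_not p (l := rest) (by simp [hr])
    simpa [hr] using this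

lemma pvRowB_eq_procP (cs : List Char) : pvProcP 0 cs = pvRowB cs := by
  induction cs using pvRowB.induct with
  | case1 => simp [pvProcP, pvRowB, pvEmit]
  | case2 c rest h ih =>
    have hsplit : rest.takeWhile pvEmptyCh ++ rest.dropWhile pvEmptyCh = rest :=
      List.takeWhile_append_dropWhile
    have hstep : pvProcP 0 (c :: rest) = pvProcP (pvVal c) rest := by
      by_cases h1 : c = '.'
      · simp [pvProcP, h1, pvVal]
      · have h2 : PySem.Chars.isdigit c = true := by simpa [pvEmptyCh, h1] using h
        simp [pvProcP, h1, h2, pvVal]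
    rw [hstep, ← hsplit,
      pvProcP_run _ (fun d hd => List.mem_takeWhile_imp hd),
      pvProcP_flush _ _ (pvDrop_shape pvEmptyCh rest), ih]
    rw [pvRowB]
    simp only [h, if_true, PySem.List.foldl_add, pvEmit]
    have hv : pvVal = fun x => if x = '.' then (1 : Int) else pvChNum x :=
      funext fun x => by simp [pvVal]
    simp [pvVal, hv]
  | case3 c rest h ih =>
    have h1 : ¬ c = '.' := by
      intro he; simp [pvEmptyCh, he] at h
    have h2 : PySem.Chars.isdigit c = false := by
      simpa [pvEmptyCh, h1] using h
    have hsplit : rest.takeWhile (fun d => !pvEmptyCh d) ++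
        rest.dropWhile (fun d => !pvEmptyCh d) = rest :=
      List.takeWhile_append_dropWhile
    have hlit : ∀ d ∈ rest.takeWhile (fun d => !pvEmptyCh d), pvEmptyCh d = false := by
      intro d hd
      simpa using List.mem_takeWhile_imp hd
    rw [show pvProcP 0 (c :: rest) = c :: pvProcP 0 rest by
        simp [pvProcP, h1, h2, pvEmit], ← hsplit, pvProcP_lit _ hlit, ih]
    rw [pvRowB]
    simp [h]

lemma pvRowA_eq_rowB : pvRowA = pvRowB := by
  funext cs
  rw [pvRowA_eq_procP, pvRowB_eq_procP]

-- ===== VERDICT (by name: the statement is the Claim_ definition above) =====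
theorem process_fen_spec : Claim_equal_process_fen := by
  intro fen _
  unfold Spec_process_fen process_fen process_fen_alt
  rw [pvRowA_eq_rowB]
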